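-- pv_equiv track=rewrite | github.com/DistriNet/avalanche-ndss2020 | evaluation_code_and_models/dataprocessing/sampleselection.py | createTrueFalseList
-- ===== SOURCE A (Python) =====
-- def createTrueFalseList(length, true_indices):
--     out = []
--     for i in range(length):
--         if i in true_indices:
--             out.append(True)
--         else:
--             out.append(False)
--     return out
-- ===== SOURCE B (Python) =====
-- def createTrueFalseList(length, true_indices):
--     out = [False] * max(0, length)
--     for idx in true_indices:
--         if 0 <= idx < length:
--             out[idx] = True
--     return out
-- ===== Notes on version B (the rewrite author's own statement) =====
-- stated objective: faster
-- what changed: B preallocates [False]*length and scatters True at each in-range index of true_indices, instead of scanning true_indices once per position of range(length).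
import Mathlib
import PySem

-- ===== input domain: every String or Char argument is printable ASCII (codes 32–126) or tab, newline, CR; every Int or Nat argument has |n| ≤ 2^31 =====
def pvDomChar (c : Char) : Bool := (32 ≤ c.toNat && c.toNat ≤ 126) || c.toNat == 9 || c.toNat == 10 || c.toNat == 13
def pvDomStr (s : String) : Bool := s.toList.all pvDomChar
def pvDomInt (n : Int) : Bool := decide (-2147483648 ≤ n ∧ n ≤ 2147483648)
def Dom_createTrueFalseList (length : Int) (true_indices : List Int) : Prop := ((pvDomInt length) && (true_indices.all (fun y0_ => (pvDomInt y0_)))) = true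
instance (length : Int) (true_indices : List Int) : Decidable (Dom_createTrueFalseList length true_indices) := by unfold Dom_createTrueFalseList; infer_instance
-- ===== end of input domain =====

-- B builds the result by scatter (preallocate, then set in-range indices) instead of
-- A's per-position membership scan; proved to return the same list.

-- ===== PORT A =====
def createTrueFalseList (length : Int) (true_indices : List Int) : List Bool :=
  (PySem.List.pyRange 0 length 1).foldl
    (fun out i => if i ∈ true_indices then out ++ [true] else out ++ [false]) []

-- ===== PORT B =====
def createTrueFalseList_alt (length : Int) (true_indices : List Int) : List Bool :=
  true_indices.foldl
    (fun out idx => if 0 ≤ idx ∧ idx < length then out.set idx.toNat true else out)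
    (List.replicate (max 0 length).toNat false)

-- ===== PRECONDITION & SPEC =====
def Spec_createTrueFalseList (length : Int) (true_indices : List Int) (out : List Bool) : Prop := out = createTrueFalseList_alt length true_indices
instance (length : Int) (true_indices : List Int) (out : List Bool) : Decidable (Spec_createTrueFalseList length true_indices out) := by unfold Spec_createTrueFalseList; infer_instance

-- ===== CLAIM (what is proved, stated in full; the proofs are below) =====
def Claim_equal_createTrueFalseList : Prop := ∀ (length : Int) (true_indices : List Int), Dom_createTrueFalseList length true_indices → Spec_createTrueFalseList length true_indices (createTrueFalseList length true_indices)

-- ===== LEMMAS AND PROOFS =====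

-- A's loop appends one Boolean per range element: it is a map over the range.
theorem aFold_eq_map (tis : List Int) :
    ∀ (l : List Int) (init : List Bool),
      l.foldl (fun out i => if i ∈ tis then out ++ [true] else out ++ [false]) init
        = init ++ l.map (fun i => decide (i ∈ tis)) := by
  intro l
  induction l with
  | nil => intro init; simp
  | cons x xs ih =>
    intro init
    simp only [List.foldl_cons, List.map_cons]
    by_cases hx : x ∈ tis <;> simp [hx, ih]

theorem bFold_length (length : Int) (tis : List Int) :
    ∀ (out : List Bool),
      (tis.foldl (fun out idx => if 0 ≤ idx ∧ idx < length then out.set idx.toNat true else out) out).length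
        = out.length := by
  induction tis with
  | nil => intro out; simp
  | cons t rest ih =>
    intro out
    simp only [List.foldl_cons]
    rw [ih]
    split <;> simp

theorem bFold_getElem (length : Int) (tis : List Int) :
    ∀ (out : List Bool) (j : Nat) (hj : j < out.length), ((j : Int) < length) →
      (tis.foldl (fun out idx => if 0 ≤ idx ∧ idx < length then out.set idx.toNat true else out) out)[j]'
        (by rw [bFold_length]; exact hj)
        = (out[j] || decide ((j : Int) ∈ tis)) := by
  induction tis with
  | nil => intro out j hj _; simp
  | cons t rest ih =>
    intro out j hj hjlen
    simp only [List.foldl_cons]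
    have hlen : (if 0 ≤ t ∧ t < length then out.set t.toNat true else out).length = out.length := by
      split <;> simp
    rw [ih _ j (by rw [hlen]; exact hj) hjlen]
    by_cases hg : 0 ≤ t ∧ t < length
    · simp only [if_pos hg]
      rw [List.getElem_set]
      by_cases he : t.toNat = j
      · have : (j : Int) = t := by omega
        simp [he, this]
      · have : (j : Int) ≠ t := by omega
        simp [he, this]
    · simp only [if_neg hg]
      have : (j : Int) ≠ t := by omega
      simp [this]

-- ===== VERDICT (by name: the statement is the Claim_ definition above) =====
theorem createTrueFalseList_spec : Claim_equal_createTrueFalseList := by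
  intro length tis _
  unfold Spec_createTrueFalseList createTrueFalseList createTrueFalseList_alt
  rw [aFold_eq_map]
  apply List.ext_getElem
  · rw [bFold_length]
    simp [PySem.List.length_pyRange_one]
    omega
  · intro j h1 h2
    have h1' := h1
    simp only [List.nil_append, List.length_map, PySem.List.length_pyRange_one] at h1'
    have hjn : j < (max 0 length).toNat := by omega
    have hjlen : (j : Int) < length := by omega
    rw [bFold_getElem length tis _ j (by simpa using hjn) hjlen]
    simp only [List.nil_append, List.getElem_map, PySem.List.getElem_pyRange_one,
      List.getElem_replicate, Bool.false_or, zero_add]
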